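-- pv_equiv track=rewrite | github.com/ShashwathKumar/Pyth_for_interview | companies/airwatch/lastSubstring.py | compute
-- ===== SOURCE A (Python) =====
-- def compute(s):
-- 	length = len(s)
-- 	i = length-1
-- 	index = i
-- 	while i>=0:
-- 		if s[i]>=s[index]:
-- 			index=i
-- 		i-=1
-- 	return s[index:]
-- ===== SOURCE B (Python) =====
-- def compute(s):
--     if not s:
--         return ""
--     m = max(s)
--     return s[s.index(m):]
-- ===== Notes on version B (the rewrite author's own statement) =====
-- stated objective: idiomatic
-- what changed: Replaces A's hand-written right-to-left argmax scan with two library passes: max(s) to find the largest character, then s.index to find its leftmost occurrence, then one slice.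
import Mathlib
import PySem

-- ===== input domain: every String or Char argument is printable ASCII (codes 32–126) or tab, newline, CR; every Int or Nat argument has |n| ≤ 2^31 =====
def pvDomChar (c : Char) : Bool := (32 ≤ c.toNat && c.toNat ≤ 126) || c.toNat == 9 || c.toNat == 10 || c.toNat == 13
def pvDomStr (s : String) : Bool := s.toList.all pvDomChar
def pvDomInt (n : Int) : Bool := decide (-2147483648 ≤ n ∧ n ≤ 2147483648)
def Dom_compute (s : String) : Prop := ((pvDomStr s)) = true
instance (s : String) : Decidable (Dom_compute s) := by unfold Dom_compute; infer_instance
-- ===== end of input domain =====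

-- B replaces A's hand-written right-to-left argmax scan with two library passes (max, then
-- leftmost index) and a slice; objective: idiomatic, same cost.


-- ===== PORT A =====
-- A's while loop: i counts down from length-1 to 0; the Nat argument is i+1 (number of
-- iterations left).  s[i]/s[index] are in range whenever the body runs, so pyGetD is exact.
def computeLoop (l : List Char) : Nat → Int → Int
  | 0, index => index
  | i + 1, index =>
      computeLoop l i (if PySem.List.pyGetD l index ' ' ≤ PySem.List.pyGetD l (i : Int) ' ' then (i : Int) else index)

def compute (s : String) : String :=
  let l := s.toList
  let length := l.length
  let index := computeLoop l length ((length : Int) - 1)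
  String.ofList (PySem.List.slice l (some index) none)   -- s[index:]

-- ===== PORT B =====
def compute_alt (s : String) : String :=
  match s.toList with
  | [] => ""                                          -- if not s: return ""
  | c :: t =>
      let m := (PySem.List.max? (c :: t) (fun x => x)).getD c   -- max(s); list nonempty, default unused
      let j := (PySem.List.index? (c :: t) m).getD 0            -- s.index(m); m ∈ s, default unused
      String.ofList (PySem.List.slice (c :: t) (some (j : Int)) none)  -- s[j:]

-- ===== PRECONDITION & SPEC =====
def Spec_compute (s : String) (out : String) : Prop := out = compute_alt s
instance (s : String) (out : String) : Decidable (Spec_compute s out) := by unfold Spec_compute; infer_instance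

-- ===== CLAIM (what is proved, stated in full; the proofs are below) =====
def Claim_equal_compute : Prop := ∀ (s : String), Dom_compute s → Spec_compute s (compute s)

-- ===== LEMMAS AND PROOFS =====

-- r is "the leftmost index of a maximal character of l"
def ArgMax (l : List Char) (r : Nat) : Prop :=
  r < l.length ∧ (∀ i, i < l.length → l.getD i ' ' ≤ l.getD r ' ') ∧
    (∀ i, i < r → l.getD i ' ' < l.getD r ' ')

theorem argMax_unique {l : List Char} {r r' : Nat} (h : ArgMax l r) (h' : ArgMax l r') : r = r' := by
  obtain ⟨hr, hle, hlt⟩ := h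
  obtain ⟨hr', hle', hlt'⟩ := h'
  rcases lt_trichotomy r r' with hc | hc | hc
  · exact absurd (hle r' hr') (not_le.2 (hlt' r hc))
  · exact hc
  · exact absurd (hle' r hr) (not_le.2 (hlt r' hc))

theorem computeLoop_spec (l : List Char) :
    ∀ (k j : Nat), k ≤ l.length → j < l.length →
      (∀ i, k ≤ i → i < l.length → l.getD i ' ' ≤ l.getD j ' ') →
      (∀ i, k ≤ i → i < j → l.getD i ' ' < l.getD j ' ') →
      ∃ r : Nat, computeLoop l k (j : Int) = (r : Int) ∧ ArgMax l r := by
  intro k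
  induction k with
  | zero =>
      intro j _ hj hle hlt
      exact ⟨j, rfl, hj, fun i hi => hle i (Nat.zero_le _) hi, fun i hi => hlt i (Nat.zero_le _) hi⟩
  | succ k ih =>
      intro j hk hj hle hlt
      have hkl : k < l.length := by omega
      simp only [computeLoop, PySem.List.pyGetD_natCast]
      by_cases hcmp : l.getD j ' ' ≤ l.getD k ' '
      · simp only [hcmp, if_true]
        refine ih k (by omega) hkl ?_ ?_
        · intro i hki hil
          rcases Nat.eq_or_lt_of_le hki with rfl | hki'
          · exact le_refl _
          · exact le_trans (hle i hki' hil) hcmp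
        · intro i hki hik; omega
      · simp only [hcmp, if_false]
        refine ih j (by omega) hj ?_ ?_
        · intro i hki hil
          rcases Nat.eq_or_lt_of_le hki with rfl | hki'
          · exact (not_le.1 hcmp).le
          · exact hle i hki' hil
        · intro i hki hij
          rcases Nat.eq_or_lt_of_le hki with rfl | hki'
          · exact not_le.1 hcmp
          · exact hlt i hki' hij

theorem compute_argMax (l : List Char) (hne : l ≠ []) :
    ∃ r : Nat, computeLoop l l.length ((l.length : Int) - 1) = (r : Int) ∧ ArgMax l r := by
  have hlen : 1 ≤ l.length := List.length_pos_iff.2 hne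
  have hcast : ((l.length : Int) - 1) = ((l.length - 1 : Nat) : Int) := by omega
  rw [hcast]
  exact computeLoop_spec l l.length (l.length - 1) (le_refl _) (by omega)
    (fun i hi hil => by omega) (fun i hi hij => by omega)

theorem alt_argMax (c : Char) (t : List Char) :
    ArgMax (c :: t) ((PySem.List.index? (c :: t) ((PySem.List.max? (c :: t) (fun x => x)).getD c)).getD 0) := by
  set l := c :: t with hl
  set m := (PySem.List.max? l (fun x => x)).getD c with hm
  have hfold : PySem.List.max? l (fun x => x) = some (t.foldl max c) := by
    rw [hl]; exact PySem.List.max?_id_cons c t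
  have hmeq : m = t.foldl max c := by rw [hm, hfold]; rfl
  have hmax : PySem.List.max? l (fun x => x) = some m := by rw [hfold, hmeq]
  have hmem : m ∈ l := PySem.List.max?_mem hmax
  have hle : ∀ y ∈ l, y ≤ m := PySem.List.max?_isMax hmax
  obtain ⟨j, hjdx⟩ := Option.isSome_iff_exists.mp ((PySem.List.index?_isSome_iff (xs := l) (v := m)).2 hmem)
  obtain ⟨hjl, hjm, hjne⟩ := PySem.List.getElem_of_index?_eq_some hjdx
  simp only [hjdx, Option.getD_some]
  refine ⟨hjl, ?_, ?_⟩
  · intro i hil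
    rw [List.getD_eq_getElem l ' ' hil, List.getD_eq_getElem l ' ' hjl, hjm]
    exact hle _ (List.getElem_mem hil)
  · intro i hij
    have hil : i < l.length := lt_trans hij hjl
    rw [List.getD_eq_getElem l ' ' hil, List.getD_eq_getElem l ' ' hjl, hjm]
    exact lt_of_le_of_ne (hle _ (List.getElem_mem hil)) (hjne i hij)

-- ===== VERDICT (by name: the statement is the Claim_ definition above) =====
theorem compute_spec : Claim_equal_compute := by
  intro s _
  unfold Spec_compute compute compute_alt
  cases hls : s.toList with
  | nil => decide
  | cons c t =>
      obtain ⟨r, hr, hargA⟩ := compute_argMax (c :: t) (by simp)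
      have hrj : r = (PySem.List.index? (c :: t)
          ((PySem.List.max? (c :: t) (fun x => x)).getD c)).getD 0 :=
        argMax_unique hargA (alt_argMax c t)
      simp only [hr, hrj, PySem.List.slice_from_natCast]
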